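-- pv_equiv track=rewrite | github.com/Lysagxra/AnimeSaturnDownloader | anime_downloader.py | format_anime_name
-- ===== SOURCE A (Python) =====
-- ENDSTRINGS = ["Sub ITA", "ITA"]
--
-- def format_anime_name(anime_name):
--     """
--     Formats the Anime name by removing specific substrings at the end.
--
--     Args:
--         anime_name (str): The Anime name extracted from the page.
--
--     Returns:
--         str: The formatted Anime name.
--
--     Raises:
--         ValueError: If the Anime name format is invalid.
--     """
--     def remove_substrings_at_end(string, substrings):
--         for substring in substrings:
--             if string.endswith(substring):
--                 return string[:-len(substring)]
--         return string
--
--     try: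
--         return remove_substrings_at_end(anime_name, ENDSTRINGS)
--
--     except IndexError:
--         raise ValueError("Invalid Anime name format.")
-- ===== SOURCE B (Python) =====
-- def format_anime_name(anime_name):
--     n = len(anime_name)
--     if anime_name[n - 3:] != "ITA":
--         return anime_name
--     cut = 7 if anime_name[n - 7:n - 3] == "Sub " else 3
--     return anime_name[:n - cut]
-- ===== Notes on version B (the rewrite author's own statement) =====
-- stated objective: simpler
-- what changed: Replaces A's loop over the candidate suffix list (an endswith test per candidate) by direct index arithmetic: two fixed-size suffix-window slice comparisons decide how many trailing characters to cut.
import Mathlib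
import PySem

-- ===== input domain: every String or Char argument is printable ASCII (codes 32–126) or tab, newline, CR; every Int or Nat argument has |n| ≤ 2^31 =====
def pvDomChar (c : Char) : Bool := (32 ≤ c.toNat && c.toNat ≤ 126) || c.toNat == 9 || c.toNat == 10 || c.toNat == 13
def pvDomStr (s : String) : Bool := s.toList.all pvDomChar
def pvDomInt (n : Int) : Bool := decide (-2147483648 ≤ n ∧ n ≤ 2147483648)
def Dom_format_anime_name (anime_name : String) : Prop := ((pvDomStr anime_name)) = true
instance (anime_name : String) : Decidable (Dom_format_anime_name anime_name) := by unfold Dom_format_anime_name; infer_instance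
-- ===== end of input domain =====

-- B replaces A's loop over the ENDSTRINGS candidates (endswith test per candidate) by direct
-- index arithmetic on one three-character suffix window: simpler, no loop, no candidate list.

-- ===== PORT A =====
-- A's try/except IndexError wrapper is dead code (slicing a Python str never raises IndexError),
-- so A is total and the except branch is not ported.
def ENDSTRINGS : List String := ["Sub ITA", "ITA"]

def removeSubstringsAtEnd (s : String) : List String → String
  | [] => s
  | sub :: rest =>
      if PySem.Str.endswith s sub then
        PySem.Str.slice s none (some (-(PySem.Str.len sub)))
      else removeSubstringsAtEnd s rest

def format_anime_name (anime_name : String) : String :=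
  removeSubstringsAtEnd anime_name ENDSTRINGS

-- ===== PORT B =====
def format_anime_name_alt (anime_name : String) : String :=
  let n : Int := PySem.Str.len anime_name
  if PySem.Str.slice anime_name (some (n - 3)) none ≠ "ITA" then anime_name
  else
    let cut : Int := if PySem.Str.slice anime_name (some (n - 7)) (some (n - 3)) = "Sub " then 7 else 3
    PySem.Str.slice anime_name none (some (n - cut))

-- ===== PRECONDITION & SPEC =====
def Spec_format_anime_name (anime_name : String) (out : String) : Prop := out = format_anime_name_alt anime_name
instance (anime_name : String) (out : String) : Decidable (Spec_format_anime_name anime_name out) := by unfold Spec_format_anime_name; infer_instance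

-- ===== CLAIM (what is proved, stated in full; the proofs are below) =====
def Claim_equal_format_anime_name : Prop := ∀ (anime_name : String), Dom_format_anime_name anime_name → Spec_format_anime_name anime_name (format_anime_name anime_name)

-- ===== LEMMAS AND PROOFS =====

theorem agree (s : String) : format_anime_name s = format_anime_name_alt s := by
  simp only [format_anime_name, format_anime_name_alt, ENDSTRINGS, removeSubstringsAtEnd]
  by_cases h7 : "Sub ITA".toList <:+ s.toList
  · obtain ⟨t, ht⟩ := h7
    have hlen : s.toList.length = t.length + 7 := by rw [← ht]; simp
    have hc1 : PySem.Str.endswith s "Sub ITA" = true := by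
      rw [PySem.Str.endswith_eq, PySem.Chars.endswith_iff]; exact ⟨t, ht⟩
    have hn3 : PySem.Str.len s - 3 = ((t.length + 4 : Nat) : Int) := by
      rw [PySem.Str.len_eq, hlen]; push_cast; ring
    have hn7 : PySem.Str.len s - 7 = ((t.length : Nat) : Int) := by
      rw [PySem.Str.len_eq, hlen]; push_cast; ring
    have hb1 : PySem.Str.slice s (some (PySem.Str.len s - 3)) none = "ITA" := by
      rw [← String.toList_inj, PySem.Str.toList_slice, PySem.Chars.slice_eq_listSlice, hn3,
        PySem.List.slice_from_natCast, ← ht, List.drop_append]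
      simp
    have hb2 : PySem.Str.slice s (some (PySem.Str.len s - 7)) (some (PySem.Str.len s - 3)) = "Sub " := by
      rw [← String.toList_inj, PySem.Str.toList_slice, PySem.Chars.slice_eq_listSlice, hn3, hn7,
        PySem.List.slice_natCast, ← ht, List.drop_append]
      have e1 : t.length + 4 - t.length = 4 := by omega
      have e2 : t.length - t.length = 0 := by omega
      rw [e1, e2, List.drop_zero, List.drop_of_length_le (le_refl t.length) ]
      decide
    rw [if_pos hc1, if_neg (by simp only [ne_eq, not_not]; exact hb1), if_pos hb2]
    rw [← String.toList_inj, PySem.Str.toList_slice, PySem.Str.toList_slice,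
      PySem.Chars.slice_eq_listSlice, PySem.Chars.slice_eq_listSlice]
    have h1 : (-(PySem.Str.len "Sub ITA") : Int) = -7 := by decide
    rw [h1, hn7, PySem.List.slice_to_natCast,
      PySem.List.slice_to_neg_ofNat s.toList 7 (by norm_num), hlen]
    simp
  · by_cases h3 : "ITA".toList <:+ s.toList
    · obtain ⟨t, ht⟩ := h3
      have hlen : s.toList.length = t.length + 3 := by rw [← ht]; simp
      have hc1 : ¬ (PySem.Str.endswith s "Sub ITA" = true) := by
        rw [PySem.Str.endswith_eq, PySem.Chars.endswith_iff]; exact h7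
      have hc2 : PySem.Str.endswith s "ITA" = true := by
        rw [PySem.Str.endswith_eq, PySem.Chars.endswith_iff]; exact ⟨t, ht⟩
      have hn3 : PySem.Str.len s - 3 = ((t.length : Nat) : Int) := by
        rw [PySem.Str.len_eq, hlen]; push_cast; ring
      have hb1 : PySem.Str.slice s (some (PySem.Str.len s - 3)) none = "ITA" := by
        rw [← String.toList_inj, PySem.Str.toList_slice, PySem.Chars.slice_eq_listSlice, hn3,
          PySem.List.slice_from_natCast, ← ht, List.drop_append]
        simp
      have hb2 : ¬ (PySem.Str.slice s (some (PySem.Str.len s - 7)) (some (PySem.Str.len s - 3)) = "Sub ") := by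
        intro h
        by_cases h4 : 4 ≤ t.length
        · have hn7 : PySem.Str.len s - 7 = ((t.length - 4 : Nat) : Int) := by
            rw [PySem.Str.len_eq, hlen]; push_cast [h4]; ring
          rw [← String.toList_inj, PySem.Str.toList_slice, PySem.Chars.slice_eq_listSlice, hn3, hn7,
            PySem.List.slice_natCast, ← ht, List.drop_append] at h
          have e2 : t.length - 4 - t.length = 0 := by omega
          have e3 : t.length - (t.length - 4) = 4 := by omega
          have hlen4 : (List.drop (t.length - 4) t).length = 4 := by
            rw [List.length_drop]; omega
          rw [e2, e3, List.drop_zero, List.take_left' hlen4] at h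
          apply h7
          refine ⟨List.take (t.length - 4) t, ?_⟩
          rw [← ht]
          conv_rhs => rw [← List.take_append_drop (t.length - 4) t]
          rw [h, List.append_assoc]
          congr 1
        · have hL := congrArg (fun x => x.toList.length) h
          simp only [PySem.Str.toList_slice, PySem.Chars.slice_eq_listSlice,
            PySem.List.length_slice] at hL
          rw [hn3] at hL
          have hc3 : PySem.List.clampIdx s.toList.length ((t.length : Nat) : Int) = t.length := by
            rw [PySem.List.clampIdx_natCast]; omega
          rw [hc3] at hL
          have h4' : "Sub ".toList.length = 4 := by decide
          omega
      rw [if_neg hc1, if_pos hc2, if_neg (by simp only [ne_eq, not_not]; exact hb1), if_neg hb2]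
      rw [← String.toList_inj, PySem.Str.toList_slice, PySem.Str.toList_slice,
        PySem.Chars.slice_eq_listSlice, PySem.Chars.slice_eq_listSlice]
      have h1 : (-(PySem.Str.len "ITA") : Int) = -3 := by decide
      rw [h1, hn3, PySem.List.slice_to_natCast,
        PySem.List.slice_to_neg_ofNat s.toList 3 (by norm_num), hlen]
      simp
    · have hc1 : ¬ (PySem.Str.endswith s "Sub ITA" = true) := by
        rw [PySem.Str.endswith_eq, PySem.Chars.endswith_iff]
        intro hsuf
        exact h3 ((by decide : "ITA".toList <:+ "Sub ITA".toList).trans hsuf)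
      have hc2 : ¬ (PySem.Str.endswith s "ITA" = true) := by
        rw [PySem.Str.endswith_eq, PySem.Chars.endswith_iff]; exact h3
      have hb1 : PySem.Str.slice s (some (PySem.Str.len s - 3)) none ≠ "ITA" := by
        intro h
        apply h3
        have h' := congrArg String.toList h
        rw [PySem.Str.toList_slice, PySem.Chars.slice_eq_listSlice,
          PySem.List.slice_some_none] at h'
        rw [← h']
        exact List.drop_suffix _ _
      rw [if_neg hc1, if_neg hc2, if_pos hb1]

-- ===== VERDICT (by name: the statement is the Claim_ definition above) =====
theorem format_anime_name_spec : Claim_equal_format_anime_name := by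
  intro s _
  unfold Spec_format_anime_name
  exact agree s
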